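-- pv_equiv track=rewrite | github.com/bohuslav-broza/mcp-gooddata | server.py | _alias_from_title
-- ===== SOURCE A (Python) =====
-- from typing import Any, Dict, List, Optional, Tuple
--
-- def _alias_from_title(title: Optional[str], fallback: str) -> str:
--     base = (title or fallback or "value").strip()
--     if not base:
--         base = fallback or "value"
--     normalized = "".join(ch if ch.isalnum() else "_" for ch in base)
--     normalized = normalized.strip("_") or fallback.replace("/", "_")
--     # Compress consecutive underscores
--     parts = [segment for segment in normalized.split("_") if segment]
--     alias = "_".join(parts) if parts else fallback.replace("/", "_")
--     return alias
-- ===== SOURCE B (Python) =====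
-- def _runs(s, keep):
--     out, cur = [], []
--     for ch in s:
--         if keep(ch):
--             cur.append(ch)
--         elif cur:
--             out.append("".join(cur))
--             cur = []
--     if cur:
--         out.append("".join(cur))
--     return out
--
-- def _alias_from_title(title, fallback):
--     base = (title or fallback or "value").strip()
--     if not base:
--         base = fallback or "value"
--     runs = _runs(base, str.isalnum)
--     if runs:
--         return "_".join(runs)
--     fb = fallback.replace("/", "_")
--     runs = _runs(fb, lambda ch: ch != "_")
--     return "_".join(runs) if runs else fb
-- ===== Notes on version B (the rewrite author's own statement) =====
-- stated objective: alternative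
-- what changed: Replaces A's mask-to-underscores, strip('_'), split('_'), filter, join pipeline with a single left-to-right pass that collects the maximal alphanumeric runs directly and joins them once.
import Mathlib
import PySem

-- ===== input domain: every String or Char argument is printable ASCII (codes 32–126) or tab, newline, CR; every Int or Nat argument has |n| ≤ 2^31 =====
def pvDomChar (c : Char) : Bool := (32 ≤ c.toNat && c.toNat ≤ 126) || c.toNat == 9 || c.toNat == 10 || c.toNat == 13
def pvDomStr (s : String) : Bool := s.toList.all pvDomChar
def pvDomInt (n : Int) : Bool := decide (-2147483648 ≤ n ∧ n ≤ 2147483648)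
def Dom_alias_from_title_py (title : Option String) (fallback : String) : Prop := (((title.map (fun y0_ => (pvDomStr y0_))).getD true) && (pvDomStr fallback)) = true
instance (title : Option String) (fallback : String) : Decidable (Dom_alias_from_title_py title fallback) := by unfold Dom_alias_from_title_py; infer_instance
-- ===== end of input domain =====

-- B replaces A's mask→strip→split→filter→join pipeline by one left-to-right pass that
-- collects the maximal alphanumeric runs directly (objective: alternative decomposition).

-- ===== PORT A =====
-- A's pipeline after the preamble is ported at the List Char level via PySem.Chars
-- ('"".join(ch if ch.isalnum() else "_" for ch in base)' is the character map, exact).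
def alias_from_title_py (title : Option String) (fallback : String) : String :=
  let t0 := title.getD ""
  let base1 := if t0 ≠ "" then t0 else if fallback ≠ "" then fallback else "value"
  let base2 := PySem.Str.strip base1
  let base := if base2 = "" then (if fallback ≠ "" then fallback else "value") else base2
  let normalized0 : List Char :=
    base.toList.map (fun ch => if PySem.Chars.isalnum ch then ch else '_')
  let fb := PySem.Str.replace fallback "/" "_"
  let normalized1 := PySem.Chars.stripChars normalized0 ['_']
  let normalized : List Char := if normalized1 = [] then fb.toList else normalized1
  let parts := (PySem.Chars.splitOn normalized ['_']).filter (fun seg => seg ≠ [])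
  if parts ≠ [] then String.ofList (PySem.Chars.join ['_'] parts) else fb

-- ===== PORT B =====
-- transliteration of Source B's _runs loop: state = (current run reversed, finished runs reversed)
def pvCollect (keep : Char → Bool) : List Char → List Char → List (List Char) → List (List Char)
  | [], cur, out => (if cur = [] then out else cur.reverse :: out).reverse
  | c :: t, cur, out =>
    if keep c then pvCollect keep t (c :: cur) out
    else if cur = [] then pvCollect keep t [] out
    else pvCollect keep t [] (cur.reverse :: out)

def alias_from_title_py_alt (title : Option String) (fallback : String) : String :=
  let t0 := title.getD ""
  let base1 := if t0 ≠ "" then t0 else if fallback ≠ "" then fallback else "value"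
  let base2 := PySem.Str.strip base1
  let base := if base2 = "" then (if fallback ≠ "" then fallback else "value") else base2
  let runs := pvCollect PySem.Chars.isalnum base.toList [] []
  if runs ≠ [] then String.ofList (PySem.Chars.join ['_'] runs)
  else
    let fb := PySem.Str.replace fallback "/" "_"
    let runs2 := pvCollect (fun ch => !(ch == '_')) fb.toList [] []
    if runs2 ≠ [] then String.ofList (PySem.Chars.join ['_'] runs2) else fb

-- ===== PRECONDITION & SPEC =====
def Spec_alias_from_title_py (title : Option String) (fallback : String) (out : String) : Prop := out = alias_from_title_py_alt title fallback
instance (title : Option String) (fallback : String) (out : String) : Decidable (Spec_alias_from_title_py title fallback out) := by unfold Spec_alias_from_title_py; infer_instance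

-- ===== CLAIM (what is proved, stated in full; the proofs are below) =====
def Claim_equal_alias_from_title_py : Prop := ∀ (title : Option String) (fallback : String), Dom_alias_from_title_py title fallback → Spec_alias_from_title_py title fallback (alias_from_title_py title fallback)

-- ===== LEMMAS AND PROOFS =====

-- reference recursion for splitting on a single '_' (proof-only)
def split1 : List Char → List Char → List (List Char)
  | [], cur => [cur.reverse]
  | c :: t, cur => if c = '_' then cur.reverse :: split1 t [] else split1 t (c :: cur)

-- the '_'-membership predicate stripChars uses (proof-only)
def pvUnd (c : Char) : Bool := ['_'].contains c

theorem go_eq_split1 : ∀ (l : List Char) (fuel : Nat) (cur : List Char) (acc : List (List Char)),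
    l.length < fuel →
    PySem.Chars.splitOn.go ['_'] fuel l cur acc = acc.reverse ++ split1 l cur := by
  intro l
  induction l with
  | nil =>
    intro fuel cur acc h
    match fuel with
    | fuel + 1 => simp [PySem.Chars.splitOn.go, split1]
  | cons c t ih =>
    intro fuel cur acc h
    match fuel with
    | fuel + 1 =>
      by_cases hc : c = '_'
      · subst hc
        rw [show PySem.Chars.splitOn.go ['_'] (fuel + 1) ('_' :: t) cur acc
              = PySem.Chars.splitOn.go ['_'] fuel t [] (cur.reverse :: acc) by
            simp [PySem.Chars.splitOn.go, List.isPrefixOf]]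
        rw [ih fuel [] (cur.reverse :: acc) (by simpa using h)]
        simp [split1]
      · rw [show PySem.Chars.splitOn.go ['_'] (fuel + 1) (c :: t) cur acc
              = PySem.Chars.splitOn.go ['_'] fuel t (c :: cur) acc by
            simp [PySem.Chars.splitOn.go, List.isPrefixOf, (Ne.symm hc)]]
        rw [ih fuel (c :: cur) acc (by simpa using h)]
        simp [split1, hc]

theorem splitOn_eq_split1 (s : List Char) :
    PySem.Chars.splitOn s ['_'] = split1 s [] := by
  unfold PySem.Chars.splitOn
  rw [go_eq_split1 s (s.length + 1) [] [] (by omega)]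
  simp

-- pvCollect computes exactly the nonempty segments of split1
theorem collect_eq_filter : ∀ (l cur : List Char) (out : List (List Char)),
    pvCollect (fun ch => !(ch == '_')) l cur out
      = out.reverse ++ (split1 l cur).filter (fun seg => seg ≠ []) := by
  intro l
  induction l with
  | nil =>
    intro cur out
    by_cases hc : cur = [] <;> simp [pvCollect, split1, hc]
  | cons c t ih =>
    intro cur out
    by_cases hc : c = '_'
    · subst hc
      by_cases hcur : cur = []
      · simp [pvCollect, split1, hcur, ih]
      · simp [pvCollect, split1, hcur, ih]
    · simp [pvCollect, split1, hc, ih]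

-- masking with '_' then splitting on '_' = keeping alnum runs
theorem collect_mask (l : List Char) : ∀ (cur : List Char) (out : List (List Char)),
    pvCollect (fun ch => !(ch == '_')) (l.map (fun ch => if PySem.Chars.isalnum ch then ch else '_')) cur out
      = pvCollect PySem.Chars.isalnum l cur out := by
  induction l with
  | nil => intro cur out; simp [pvCollect]
  | cons c t ih =>
    intro cur out
    by_cases hc : PySem.Chars.isalnum c
    · have hne : ¬ (c = '_') := by
        intro h; subst h; exact absurd hc (by decide)
      simp [pvCollect, hc, hne, ih]
    · simp [pvCollect, hc, ih]

-- an all-'_' string contributes only the pending segment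
theorem split1_all_underscore : ∀ (s cur : List Char), (∀ c ∈ s, c = '_') →
    (split1 s cur).filter (fun seg => seg ≠ []) = [cur.reverse].filter (fun seg => seg ≠ []) := by
  intro s
  induction s with
  | nil => intro cur _; rfl
  | cons c t ih =>
    intro cur h
    have hc : c = '_' := h c (by simp)
    subst hc
    have ht : (split1 t []).filter (fun seg => seg ≠ []) = [] := by
      simpa using ih [] (fun c hm => h c (by simp [hm]))
    have hgoal : split1 ('_' :: t) cur = cur.reverse :: split1 t [] := by simp [split1]
    rw [hgoal, List.filter_cons, List.filter_cons, ht]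
    simp

-- trailing all-'_' suffixes do not change the nonempty segments
theorem split1_append_underscore : ∀ (r : List Char) (s cur : List Char), (∀ c ∈ s, c = '_') →
    (split1 (r ++ s) cur).filter (fun seg => seg ≠ [])
      = (split1 r cur).filter (fun seg => seg ≠ []) := by
  intro r
  induction r with
  | nil => intro s cur h; simpa [split1] using split1_all_underscore s cur h
  | cons c t ih =>
    intro s cur h
    by_cases hc : c = '_'
    · subst hc
      rw [List.cons_append]
      have e1 : split1 ('_' :: (t ++ s)) cur = cur.reverse :: split1 (t ++ s) [] := by simp [split1]
      have e2 : split1 ('_' :: t) cur = cur.reverse :: split1 t [] := by simp [split1]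
      rw [e1, e2, List.filter_cons, List.filter_cons, ih s [] h]
    · simp only [List.cons_append, split1, if_neg hc]
      exact ih s (c :: cur) h

-- leading '_'s do not change the nonempty segments
theorem split1_dropWhile (l : List Char) :
    (split1 (l.dropWhile pvUnd) []).filter (fun seg => seg ≠ [])
      = (split1 l []).filter (fun seg => seg ≠ []) := by
  induction l with
  | nil => rfl
  | cons c t ih =>
    by_cases hc : c = '_'
    · subst hc
      simpa [List.dropWhile, pvUnd, split1, List.filter_cons] using ih
    · simp [List.dropWhile, pvUnd, hc]

theorem split1_stripChars (m : List Char) :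
    (split1 (PySem.Chars.stripChars m ['_']) []).filter (fun seg => seg ≠ [])
      = (split1 m []).filter (fun seg => seg ≠ []) := by
  have hs : PySem.Chars.stripChars m ['_']
      = ((m.dropWhile pvUnd).reverse.dropWhile pvUnd).reverse := rfl
  rw [hs]
  have hdecomp : ∀ (w : List Char),
      w = (w.reverse.dropWhile pvUnd).reverse ++ (w.reverse.takeWhile pvUnd).reverse := by
    intro w
    conv_lhs => rw [← List.reverse_reverse w,
      ← List.takeWhile_append_dropWhile (p := pvUnd) (l := w.reverse)]
    rw [List.reverse_append]
  have hall : ∀ c ∈ ((m.dropWhile pvUnd).reverse.takeWhile pvUnd).reverse, c = '_' := by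
    intro c hc
    have h2 := List.mem_takeWhile_imp (List.mem_reverse.mp hc)
    simpa [pvUnd] using h2
  calc (split1 ((m.dropWhile pvUnd).reverse.dropWhile pvUnd).reverse []).filter (fun seg => seg ≠ [])
      = (split1 (((m.dropWhile pvUnd).reverse.dropWhile pvUnd).reverse
          ++ ((m.dropWhile pvUnd).reverse.takeWhile pvUnd).reverse) []).filter (fun seg => seg ≠ []) :=
        (split1_append_underscore _ _ [] hall).symm
    _ = (split1 (m.dropWhile pvUnd) []).filter (fun seg => seg ≠ []) := by
        rw [← hdecomp (m.dropWhile pvUnd)]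
    _ = (split1 m []).filter (fun seg => seg ≠ []) := split1_dropWhile m

-- a nonempty current run guarantees a nonempty segment
theorem split1_ne_of_cur : ∀ (s cur : List Char), cur ≠ [] →
    (split1 s cur).filter (fun seg => seg ≠ []) ≠ [] := by
  intro s
  induction s with
  | nil => intro cur h; simp [split1, h]
  | cons c t ih =>
    intro cur h
    by_cases hc : c = '_'
    · subst hc; simp [split1, h]
    · simp only [split1, if_neg hc]
      exact ih (c :: cur) (by simp)

theorem split1_ne_of_mem : ∀ (s cur : List Char), (∃ c ∈ s, c ≠ '_') →
    (split1 s cur).filter (fun seg => seg ≠ []) ≠ [] := by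
  intro s
  induction s with
  | nil => rintro cur ⟨c, hc, _⟩; simp at hc
  | cons c t ih =>
    rintro cur ⟨d, hd, hdne⟩
    by_cases hc : c = '_'
    · subst hc
      have hdt : d ∈ t := by
        rcases List.mem_cons.mp hd with h | h
        · exact absurd h hdne
        · exact h
      have hF := ih [] ⟨d, hdt, hdne⟩
      have e : split1 ('_' :: t) cur = cur.reverse :: split1 t [] := by simp [split1]
      rw [e, List.filter_cons]
      intro hcontra
      apply hF
      by_cases hcur : cur.reverse = []
      · simpa [hcur] using hcontra
      · simp [hcur] at hcontra
    · simp only [split1, if_neg hc]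
      exact split1_ne_of_cur t (c :: cur) (by simp)

-- if dropWhile produces a cons, its head fails the predicate
theorem dropWhile_head_false (p : Char → Bool) : ∀ (l : List Char) (c : Char) (t : List Char),
    List.dropWhile p l = c :: t → p c = false := by
  intro l
  induction l with
  | nil => intro c t h; simp [List.dropWhile] at h
  | cons a l' ih =>
    intro c t h
    by_cases ha : p a
    · rw [List.dropWhile_cons_of_pos ha] at h
      exact ih c t h
    · rw [List.dropWhile_cons_of_neg ha] at h
      rw [← (List.cons.injEq _ _ _ _).mp h |>.1]
      simpa using ha

-- a nonempty stripChars result contains a non-'_' character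
theorem stripChars_exists_ne (m : List Char) (h : PySem.Chars.stripChars m ['_'] ≠ []) :
    ∃ c ∈ PySem.Chars.stripChars m ['_'], c ≠ '_' := by
  have hs : PySem.Chars.stripChars m ['_']
      = ((m.dropWhile pvUnd).reverse.dropWhile pvUnd).reverse := rfl
  rw [hs] at h ⊢
  have hvne : (m.dropWhile pvUnd).reverse.dropWhile pvUnd ≠ [] := by
    intro hc; exact h (by rw [hc]; rfl)
  obtain ⟨c, t, hct⟩ := List.exists_cons_of_ne_nil hvne
  have hc : pvUnd c = false := dropWhile_head_false pvUnd _ c t hct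
  refine ⟨c, ?_, ?_⟩
  · rw [hct]; simp
  · intro hcontra; subst hcontra; simp [pvUnd] at hc

-- the combined characterization of A's parts
theorem partsA_eq (l : List Char) :
    ((PySem.Chars.splitOn (PySem.Chars.stripChars (l.map (fun ch => if PySem.Chars.isalnum ch then ch else '_')) ['_']) ['_']).filter (fun seg => seg ≠ []))
      = pvCollect PySem.Chars.isalnum l [] [] := by
  rw [splitOn_eq_split1, split1_stripChars, ← collect_mask l [] [], collect_eq_filter]
  simp

-- ===== VERDICT (by name: the statement is the Claim_ definition above) =====
theorem alias_from_title_py_spec : Claim_equal_alias_from_title_py := by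
  intro title fallback _
  unfold Spec_alias_from_title_py alias_from_title_py alias_from_title_py_alt
  dsimp only
  set base := (if PySem.Str.strip (if title.getD "" ≠ "" then title.getD "" else if fallback ≠ "" then fallback else "value") = ""
      then (if fallback ≠ "" then fallback else "value")
      else PySem.Str.strip (if title.getD "" ≠ "" then title.getD "" else if fallback ≠ "" then fallback else "value")) with hbase
  set l := base.toList with hl
  set fb := PySem.Str.replace fallback "/" "_" with hfb
  set m := l.map (fun ch => if PySem.Chars.isalnum ch then ch else '_') with hm
  set R := pvCollect PySem.Chars.isalnum l [] [] with hR
  by_cases hstrip : PySem.Chars.stripChars m ['_'] = []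
  · -- fallback path: the masked string strips to empty, so R = []
    have hRnil : R = [] := by
      rw [hR, ← partsA_eq l, ← hm, hstrip, splitOn_eq_split1]
      simp [split1]
    rw [if_pos hstrip, hRnil]
    rw [splitOn_eq_split1, collect_eq_filter fb.toList [] []]
    simp
  · -- main path: nonempty strip, so the parts are exactly R and R ≠ []
    have hRne : R ≠ [] := by
      rw [hR, ← partsA_eq l, ← hm, splitOn_eq_split1]
      exact split1_ne_of_mem _ [] (stripChars_exists_ne m hstrip)
    have hparts : ((PySem.Chars.splitOn (PySem.Chars.stripChars m ['_']) ['_']).filter (fun seg => seg ≠ [])) = R := by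
      rw [hm, partsA_eq l, hR]
    rw [if_neg hstrip, hparts]
    simp [hRne]
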